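-- pv_equiv track=rewrite | github.com/Magdoll/cDNA_Cupcake | singlecell/clip_out_UMI_cellBC.py | find_Aend
-- ===== SOURCE A (Python) =====
-- def find_Aend(seq, min_a_len=8):
--     """
--     Given a sequence, find the likely beginning and end of polyA tail
--     """
--     Aseq = 'A'*min_a_len
--     # will search for only the last 200 bp of the sequence
--     x = seq[-200:]
--     j = x.rfind(Aseq)
--
--     if j >= 0:
--         # now find the beginning
--         end = len(seq)-200+j+min_a_len
--         start = end-1
--         while start >= 0 and seq[start]=='A':
--             start -= 1
--         return start, end
--     else:
--         return -1, -1
-- ===== SOURCE B (Python) =====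
-- def find_Aend(seq, min_a_len=8):
--     """
--     Single forward pass over the last-200bp window with a run counter:
--     remember the end of the last maximal A-run of length >= min_a_len.
--     """
--     x = seq[-200:]
--     best_end = None
--     run = 0
--     for i, c in enumerate(x):
--         if c == 'A':
--             run += 1
--             if run >= min_a_len:
--                 best_end = i + 1
--         else:
--             run = 0
--     if best_end is None:
--         return -1, -1
--     end = len(seq) - 200 + best_end
--     start = end - 1
--     while start >= 0 and seq[start] == 'A':
--         start -= 1
--     return start, end
-- ===== Notes on version B (the rewrite author's own statement) =====
-- stated objective: alternative
-- what changed: Replaced rfind of the repeated pattern (right-to-left substring search) plus index arithmetic by a single left-to-right pass over the 200bp window with a run-length counter that records the end of the last A-run of length >= min_a_len; Pre_ excludes min_a_len <= 0, where the requested pattern is empty and A's rfind of an empty pattern degenerately matches at the window end while B reports no tail.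
-- outside the precondition, e.g. on find_Aend('CCC', 0): A returns (-195, -194), B returns (-1, -1)
import Mathlib
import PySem

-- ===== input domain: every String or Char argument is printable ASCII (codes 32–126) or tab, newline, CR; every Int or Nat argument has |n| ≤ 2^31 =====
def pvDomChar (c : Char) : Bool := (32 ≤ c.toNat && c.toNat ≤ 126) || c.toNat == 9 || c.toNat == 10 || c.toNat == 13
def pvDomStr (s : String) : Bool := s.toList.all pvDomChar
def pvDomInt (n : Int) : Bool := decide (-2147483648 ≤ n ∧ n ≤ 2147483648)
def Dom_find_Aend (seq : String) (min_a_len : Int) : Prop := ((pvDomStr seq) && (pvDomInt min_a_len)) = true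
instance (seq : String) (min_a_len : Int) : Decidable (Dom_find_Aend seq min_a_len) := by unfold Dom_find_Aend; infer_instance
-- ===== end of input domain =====

-- B replaces rfind-of-'A'*min_a_len with a single forward run-counting pass over the window (alternative traversal, same cost class).


-- ===== PORT A =====
-- shared backward while-loop 'while start >= 0 and seq[start]=='A': start -= 1'
-- (pyGetD is exact here: under Pre_ every probed index with 0 ≤ start is in range)
def ascanBack (cs : List Char) (start : Int) : Int :=
  if h : 0 ≤ start ∧ PySem.List.pyGetD cs start ' ' = 'A' then ascanBack cs (start - 1) else start
termination_by (start + 1).toNat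
decreasing_by omega

def find_Aend (seq : String) (min_a_len : Int) : Int × Int :=
  let Aseq := PySem.List.pyRepeat ['A'] min_a_len
  let x := PySem.List.slice seq.toList (some (-200)) none
  let j := PySem.Chars.rfind x Aseq
  if 0 ≤ j then
    let e := (seq.toList.length : Int) - 200 + j + min_a_len
    (ascanBack seq.toList (e - 1), e)
  else (-1, -1)

-- ===== PORT B =====
-- one fold step of B's forward pass: run counter + end of last qualifying A-run
def bstep (min_a_len : Int) (s : Option Int × Int) (ic : Int × Char) : Option Int × Int :=
  if ic.2 = 'A' then
    (if min_a_len ≤ s.2 + 1 then some (ic.1 + 1) else s.1, s.2 + 1)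
  else (s.1, 0)

def find_Aend_alt (seq : String) (min_a_len : Int) : Int × Int :=
  let x := PySem.List.slice seq.toList (some (-200)) none
  let st := (PySem.List.enumerate x 0).foldl (bstep min_a_len) (none, 0)
  match st.1 with
  | none => (-1, -1)
  | some e =>
    let e' := (seq.toList.length : Int) - 200 + e
    (ascanBack seq.toList (e' - 1), e')

-- ===== PRECONDITION & SPEC =====
-- Pre_ excludes min_a_len ≤ 0: there the requested poly-A pattern is empty, a degenerate corner no caller
-- would specify — A's rfind of an empty pattern reports a match at the window end, B reports no tail.
def Pre_find_Aend (seq : String) (min_a_len : Int) : Prop := 1 ≤ min_a_len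
instance (seq : String) (min_a_len : Int) : Decidable (Pre_find_Aend seq min_a_len) := by unfold Pre_find_Aend; infer_instance
def pvWitness_find_Aend : String × Int := ("GGCCAAAAAAAAAATT", 8)

def Spec_find_Aend (seq : String) (min_a_len : Int) (out : Int × Int) : Prop := out = find_Aend_alt seq min_a_len
instance (seq : String) (min_a_len : Int) (out : Int × Int) : Decidable (Spec_find_Aend seq min_a_len out) := by unfold Spec_find_Aend; infer_instance

-- ===== CLAIM (what is proved, stated in full; the proofs are below) =====
def Claim_equal_find_Aend : Prop := ∀ (seq : String) (min_a_len : Int), Dom_find_Aend seq min_a_len → Pre_find_Aend seq min_a_len → Spec_find_Aend seq min_a_len (find_Aend seq min_a_len)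

-- ===== LEMMAS AND PROOFS =====

-- length of the maximal 'A'-run at the head of a list (applied to reverses: the trailing run)
def trailARev : List Char → Nat
  | [] => 0
  | c :: cs => if c = 'A' then trailARev cs + 1 else 0

theorem le_trailARev_iff (l : List Char) (t : Nat) : t ≤ trailARev l ↔ List.replicate t 'A' <+: l := by
  induction l generalizing t with
  | nil =>
    cases t with
    | zero => simp
    | succ t => simp [trailARev]
  | cons c cs ih =>
    cases t with
    | zero => simp
    | succ t =>
      simp only [trailARev, List.replicate_succ, List.cons_prefix_cons]
      split_ifs with hc
      · subst hc
        constructor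
        · intro h; exact ⟨rfl, (ih t).1 (by omega)⟩
        · rintro ⟨-, h⟩; have := (ih t).2 h; omega
      · constructor
        · omega
        · rintro ⟨h1, -⟩; exact absurd h1.symm hc

theorem trailARev_le_length (l : List Char) : trailARev l ≤ l.length := by
  induction l with
  | nil => simp [trailARev]
  | cons c cs ih =>
    simp only [trailARev, List.length_cons]
    split_ifs <;> omega

theorem repl_prefix_len {m j : Nat} {l : List Char} (hm : 1 ≤ m)
    (h : List.replicate m 'A' <+: l.drop j) : j + m ≤ l.length := by
  have := h.length_le
  simp [List.length_drop] at this
  omega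

theorem Q_snoc_lt {m j : Nat} {x : List Char} {c : Char} (h : j + m ≤ x.length) :
    (List.replicate m 'A' <+: (x ++ [c]).drop j) ↔ List.replicate m 'A' <+: x.drop j := by
  rw [List.drop_append_of_le_length (by omega)]
  rw [List.prefix_iff_eq_take, List.prefix_iff_eq_take, List.length_replicate,
    List.take_append_of_le_length (by simp; omega)]

theorem Q_snoc_top {m j : Nat} {x : List Char} {c : Char} (hm : 1 ≤ m) (hj : j + m = x.length + 1) :
    (List.replicate m 'A' <+: (x ++ [c]).drop j) ↔ m ≤ trailARev (c :: x.reverse) := by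
  rw [le_trailARev_iff]
  constructor
  · intro h
    have heq : List.replicate m 'A' = (x ++ [c]).drop j := by
      refine List.IsPrefix.eq_of_length h ?_
      simp; omega
    have hs : List.replicate m 'A' <:+ (x ++ [c]) := heq ▸ List.drop_suffix j _
    rw [← List.reverse_prefix] at hs
    simpa [List.reverse_append] using hs
  · intro h
    have hs : List.replicate m 'A' <:+ (x ++ [c]) := by
      rw [← List.reverse_prefix]
      simpa [List.reverse_append] using h
    obtain ⟨t, ht⟩ := hs
    have hl : t.length = j := by
      have := congrArg List.length ht
      simp at this; omega
    have hd : (x ++ [c]).drop j = List.replicate m 'A' := by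
      rw [← ht, ← hl, List.drop_left]
    rw [hd]

theorem Q_snoc_iff {m j : Nat} {x : List Char} {c : Char} (hm : 1 ≤ m)
    (htop : ¬ m ≤ trailARev (c :: x.reverse)) :
    (List.replicate m 'A' <+: (x ++ [c]).drop j) ↔ List.replicate m 'A' <+: x.drop j := by
  constructor
  · intro h
    have hl := repl_prefix_len hm h
    simp at hl
    rcases Nat.lt_or_ge (j + m) (x.length + 1) with hlt | hge
    · exact (Q_snoc_lt (by omega)).1 h
    · exact absurd ((Q_snoc_top hm (by omega)).1 h) htop
  · intro h
    exact (Q_snoc_lt (repl_prefix_len hm h)).2 h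

theorem go_spec (s sub : List Char) (k : Nat) :
    (PySem.Chars.rfind.go s sub k = -1 ∧ ∀ j, j ≤ k → ¬ sub <+: s.drop j) ∨
    (∃ j, j ≤ k ∧ PySem.Chars.rfind.go s sub k = (j : Int) ∧ sub <+: s.drop j ∧
      ∀ i, j < i → i ≤ k → ¬ sub <+: s.drop i) := by
  induction k with
  | zero =>
    by_cases h : sub <+: s
    · right
      refine ⟨0, le_refl _, ?_, by simpa using h, ?_⟩
      · simp [PySem.Chars.rfind.go, List.isPrefixOf_iff_prefix, h]
      · omega
    · left
      constructor
      · simp [PySem.Chars.rfind.go, List.isPrefixOf_iff_prefix, h]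
      · intro j hj; interval_cases j; simpa using h
  | succ k ih =>
    by_cases h : sub <+: s.drop (k + 1)
    · right
      refine ⟨k + 1, le_refl _, ?_, h, by omega⟩
      simp [PySem.Chars.rfind.go, List.isPrefixOf_iff_prefix, h]
    · have hgo : PySem.Chars.rfind.go s sub (k + 1) = PySem.Chars.rfind.go s sub k := by
        simp [PySem.Chars.rfind.go, List.isPrefixOf_iff_prefix, h]
      rcases ih with ⟨h1, h2⟩ | ⟨j, hj, he, hp, hmax⟩
      · left
        refine ⟨hgo ▸ h1, fun j hj => ?_⟩
        rcases Nat.lt_or_ge j (k + 1) with hlt | hge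
        · exact h2 j (by omega)
        · have hj1 : j = k + 1 := by omega
          subst hj1; exact h
      · right
        refine ⟨j, by omega, hgo ▸ he, hp, fun i hji hik => ?_⟩
        rcases Nat.lt_or_ge i (k + 1) with hlt | hge
        · exact hmax i hji (by omega)
        · have hi1 : i = k + 1 := by omega
          subst hi1; exact h

theorem fold_inv (min : Int) (hm : 1 ≤ min) (x : List Char) :
    ((PySem.List.enumerate x 0).foldl (bstep min) (none, 0)).2 = (trailARev x.reverse : Int) ∧
    ((((PySem.List.enumerate x 0).foldl (bstep min) (none, 0)).1 = none ∧
        ∀ j : Nat, ¬ List.replicate min.toNat 'A' <+: x.drop j) ∨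
      (∃ j : Nat, ((PySem.List.enumerate x 0).foldl (bstep min) (none, 0)).1 = some ((j : Int) + min) ∧
        List.replicate min.toNat 'A' <+: x.drop j ∧
        ∀ i : Nat, j < i → ¬ List.replicate min.toNat 'A' <+: x.drop i)) := by
  have hmn : ((min.toNat : Int)) = min := Int.toNat_of_nonneg (by omega)
  have hm1 : 1 ≤ min.toNat := by omega
  induction x using List.reverseRecOn with
  | nil =>
    refine ⟨by simp [trailARev], Or.inl ⟨by simp, fun j h => ?_⟩⟩
    rw [List.drop_nil, List.prefix_nil] at h
    have := congrArg List.length h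
    simp at this
    omega
  | append_singleton x c ih =>
    have hE : (PySem.List.enumerate (x ++ [c]) 0).foldl (bstep min) (none, 0)
        = bstep min ((PySem.List.enumerate x 0).foldl (bstep min) (none, 0)) ((x.length : Int), c) := by
      simp [PySem.List.enumerate_append, PySem.List.enumerate_cons, PySem.List.enumerate_nil]
    obtain ⟨ih2, ihb⟩ := ih
    have hrev : (x ++ [c]).reverse = c :: x.reverse := by simp
    have hTlen : trailARev x.reverse ≤ x.length := by
      have := trailARev_le_length x.reverse; simpa using this
    rw [hE, hrev]
    by_cases hc : c = 'A'
    · subst hc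
      have htr : trailARev ('A' :: x.reverse) = trailARev x.reverse + 1 := by simp [trailARev]
      by_cases hcond : min ≤ ((PySem.List.enumerate x 0).foldl (bstep min) (none, 0)).2 + 1
      · refine ⟨?_, Or.inr ⟨x.length + 1 - min.toNat, ?_, ?_, ?_⟩⟩
        · simp [bstep, ih2, htr]
        · simp [bstep, hcond]
          rw [ih2] at hcond
          omega
        · rw [Q_snoc_top hm1 (by rw [ih2] at hcond; omega)]
          rw [htr]
          rw [ih2] at hcond
          omega
        · intro i hi hQ
          have := repl_prefix_len hm1 hQ
          simp at this
          omega
      · have htop : ¬ min.toNat ≤ trailARev ('A' :: x.reverse) := by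
          rw [ih2] at hcond; rw [htr]; omega
        refine ⟨by simp [bstep, ih2, htr], ?_⟩
        have hfst : (bstep min ((PySem.List.enumerate x 0).foldl (bstep min) (none, 0)) ((x.length : Int), 'A')).1
            = ((PySem.List.enumerate x 0).foldl (bstep min) (none, 0)).1 := by
          simp [bstep, hcond]
        rw [hfst]
        rcases ihb with ⟨h1, h2⟩ | ⟨j, hj, hQ, hmax⟩
        · exact Or.inl ⟨h1, fun j h => h2 j ((Q_snoc_iff hm1 htop).1 h)⟩
        · exact Or.inr ⟨j, hj, (Q_snoc_iff hm1 htop).2 hQ, fun i hij h => hmax i hij ((Q_snoc_iff hm1 htop).1 h)⟩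
    · have htop : ¬ min.toNat ≤ trailARev (c :: x.reverse) := by
        simp [trailARev, hc]; omega
      refine ⟨by simp [bstep, hc, trailARev], ?_⟩
      have hfst : (bstep min ((PySem.List.enumerate x 0).foldl (bstep min) (none, 0)) ((x.length : Int), c)).1
          = ((PySem.List.enumerate x 0).foldl (bstep min) (none, 0)).1 := by
        simp [bstep, hc]
      rw [hfst]
      rcases ihb with ⟨h1, h2⟩ | ⟨j, hj, hQ, hmax⟩
      · exact Or.inl ⟨h1, fun j h => h2 j ((Q_snoc_iff hm1 htop).1 h)⟩
      · exact Or.inr ⟨j, hj, (Q_snoc_iff hm1 htop).2 hQ, fun i hij h => hmax i hij ((Q_snoc_iff hm1 htop).1 h)⟩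

-- ===== VERDICT (by name: the statement is the Claim_ definition above) =====
theorem find_Aend_spec : Claim_equal_find_Aend := by
  intro seq min _hd hpre
  have hm : (1 : Int) ≤ min := hpre
  have hmn : ((min.toNat : Int)) = min := Int.toNat_of_nonneg (by omega)
  unfold Spec_find_Aend
  simp only [find_Aend, find_Aend_alt]
  set cs := seq.toList with hcs
  set x := PySem.List.slice cs (some (-200)) none with hx
  have hrep : PySem.List.pyRepeat ['A'] min = List.replicate min.toNat 'A' :=
    PySem.List.pyRepeat_singleton _ _
  have hrf : PySem.Chars.rfind x (PySem.List.pyRepeat ['A'] min)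
      = PySem.Chars.rfind.go x (List.replicate min.toNat 'A') x.length := by
    rw [hrep]; rfl
  rcases go_spec x (List.replicate min.toNat 'A') x.length with ⟨hg, hnone⟩ | ⟨j, hjk, hgo, hQ, hmax⟩ <;>
    rcases (fold_inv min hm x).2 with ⟨hf, hfnone⟩ | ⟨j0, hf, hQ0, hmax0⟩
  · rw [hrf, hg, hf]
    norm_num
  · exact absurd hQ0 (hnone j0 (by have := repl_prefix_len (by omega) hQ0; omega))
  · exact absurd hQ (hfnone j)
  · have hjj : j = j0 := by
      rcases lt_trichotomy j j0 with h | h | h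
      · exact absurd hQ0 (hmax j0 h (by have := repl_prefix_len (by omega) hQ0; omega))
      · exact h
      · exact absurd hQ (hmax0 j h)
    subst hjj
    rw [hrf, hgo, hf]
    have hpos : (0 : Int) ≤ (j : Int) := Int.natCast_nonneg j
    rw [if_pos hpos]
    have harg : (cs.length : Int) - 200 + (j : Int) + min = (cs.length : Int) - 200 + ((j : Int) + min) := by ring
    simp [harg]
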